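-- pv_equiv track=rewrite | github.com/Quentin-Boone/vizfada_app | Django/utils/generic_functions.py | split_on_upper
-- ===== SOURCE A (Python) =====
-- SPLIT_EXCEPTIONS = ["poolOfSpecimens", "cellSpecimen"]
--
-- def split_on_upper(string, capitalize=True):
--     parent = string[:string.rfind(".")]
--     dotidx = string.rfind(".")
--     if parent in SPLIT_EXCEPTIONS:
--         string = parent + string[dotidx+1].upper() + string[dotidx+2:]
--     else:
--         string = string[dotidx+1:]
--     if "_" in string:
--         string = string[:string.rfind("_")]
--     uppers = [i for i in string if i.isupper()]
--     for i in uppers: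
--         string = string.replace(i, " {}".format(i.lower()))
--     string = string.capitalize()
--     return string
-- ===== SOURCE B (Python) =====
-- SPLIT_EXCEPTIONS = ["poolOfSpecimens", "cellSpecimen"]
--
-- def split_on_upper(string, capitalize=True):
--     d = string.rfind(".")
--     head = string[:d]
--     if head in SPLIT_EXCEPTIONS:
--         rest = head + string[d+1].upper() + string[d+2:]
--     else:
--         rest = string[d+1:]
--     if "_" in rest:
--         rest = rest[:rest.rfind("_")]
--     out = []
--     for ch in rest:
--         if ch.isupper():
--             out.append(" ")
--             out.append(ch.lower())
--         else:
--             out.append(ch)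
--     if out:
--         out[0] = out[0].upper()
--     return "".join(out)
-- ===== Notes on version B (the rewrite author's own statement) =====
-- stated objective: simpler
-- what changed: A collects the uppercase letters and runs one full-string str.replace per letter then calls .capitalize(); B builds the output in one pass over the characters (emitting a space plus the lowercased letter for each uppercase character) and only uppercases the first emitted character, with no replace and no capitalize pass.
-- outside the precondition, e.g. on split_on_upper('poolOfSpecimens.', True): A raises IndexError, B raises IndexError; on split_on_upper('cellSpecimen.', True): A raises IndexError, B raises IndexError
import Mathlib
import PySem

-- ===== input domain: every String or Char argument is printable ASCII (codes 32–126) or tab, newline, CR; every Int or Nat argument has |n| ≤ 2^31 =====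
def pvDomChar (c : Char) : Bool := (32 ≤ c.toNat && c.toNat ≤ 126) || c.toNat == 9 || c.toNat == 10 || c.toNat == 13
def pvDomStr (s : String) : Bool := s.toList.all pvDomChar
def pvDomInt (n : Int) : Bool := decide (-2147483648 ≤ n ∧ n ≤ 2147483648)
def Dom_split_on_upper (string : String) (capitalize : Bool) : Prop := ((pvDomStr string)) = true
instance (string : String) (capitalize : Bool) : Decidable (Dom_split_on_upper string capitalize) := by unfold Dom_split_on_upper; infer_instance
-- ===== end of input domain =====

-- B replaces A's per-uppercase-letter str.replace loop and trailing .capitalize() by one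
-- character pass that emits a space plus the lowercased letter for each uppercase character,
-- then uppercases only the first emitted character; objective: simpler (one pass, no replace/capitalize scans).
-- The 'capitalize' parameter is unused by the Python A and is kept unused here.

-- ===== PORT A =====
-- str.capitalize(), ported by hand (exact on ASCII: upper-case first char, lower-case the rest)
def aCapitalize (cs : List Char) : List Char :=
  match cs with
  | [] => []
  | c :: t => PySem.Chars.upperChar c :: t.map PySem.Chars.lowerChar

def aSplitExceptions : List (List Char) := [("poolOfSpecimens".toList), ("cellSpecimen".toList)]

def split_on_upper (string : String) (capitalize : Bool) : String :=
  let cs := string.toList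
  -- parent = string[:string.rfind(".")]; dotidx = string.rfind(".")  (A computes rfind twice)
  let parent := PySem.List.slice cs none (some (PySem.Chars.rfind cs ['.']))
  let dotidx := PySem.Chars.rfind cs ['.']
  let s1 :=
    if parent ∈ aSplitExceptions then
      -- string[dotidx+1] raises IndexError when out of range: Pre_ excludes exactly those inputs
      match PySem.List.pyGet? cs (dotidx + 1) with
      | some c => parent ++ [PySem.Chars.upperChar c] ++ PySem.List.slice cs (some (dotidx + 2)) none
      | none => parent -- unreachable inside Pre_ (Python raises IndexError here)
    else
      PySem.List.slice cs (some (dotidx + 1)) none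
  let s2 :=
    if PySem.Chars.isIn ['_'] s1 then
      PySem.List.slice s1 none (some (PySem.Chars.rfind s1 ['_']))
    else s1
  let uppers := s2.filter (fun c => PySem.Chars.isupper c)
  let s3 := uppers.foldl (fun acc u => PySem.Chars.replace acc [u] [' ', PySem.Chars.lowerChar u]) s2
  String.mk (aCapitalize s3)

-- ===== PORT B =====
-- the single character pass of Source B: uppercase c ↦ ' ', lower(c); other chars kept
def bExpand (cs : List Char) : List Char :=
  match cs with
  | [] => []
  | c :: t =>
    if PySem.Chars.isupper c then ' ' :: PySem.Chars.lowerChar c :: bExpand t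
    else c :: bExpand t

-- 'if out: out[0] = out[0].upper()' of Source B
def bCapFirst (cs : List Char) : List Char :=
  match cs with
  | [] => []
  | c :: t => PySem.Chars.upperChar c :: t

def split_on_upper_alt (string : String) (capitalize : Bool) : String :=
  let cs := string.toList
  let d := PySem.Chars.rfind cs ['.']
  let head := PySem.List.slice cs none (some d)
  let rest :=
    if head ∈ [("poolOfSpecimens".toList), ("cellSpecimen".toList)] then
      match PySem.List.pyGet? cs (d + 1) with
      | some c => head ++ [PySem.Chars.upperChar c] ++ PySem.List.slice cs (some (d + 2)) none
      | none => head -- unreachable inside Pre_ (Python raises IndexError here)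
    else
      PySem.List.slice cs (some (d + 1)) none
  let rest2 :=
    if PySem.Chars.isIn ['_'] rest then
      PySem.List.slice rest none (some (PySem.Chars.rfind rest ['_']))
    else rest
  String.mk (bCapFirst (bExpand rest2))

-- ===== PRECONDITION & SPEC =====
-- Pre_ excludes exactly the two strings "poolOfSpecimens." and "cellSpecimen.", on which
-- A raises IndexError (string[dotidx+1] with dotidx+1 = len(string)); B raises there too.
def Pre_split_on_upper (string : String) (capitalize : Bool) : Prop :=
  string ≠ "poolOfSpecimens." ∧ string ≠ "cellSpecimen."
instance (string : String) (capitalize : Bool) : Decidable (Pre_split_on_upper string capitalize) := by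
  unfold Pre_split_on_upper; infer_instance

def pvWitness_split_on_upper : String × Bool := ("poolOfSpecimens.someThing_x", true)

def Spec_split_on_upper (string : String) (capitalize : Bool) (out : String) : Prop := out = split_on_upper_alt string capitalize
instance (string : String) (capitalize : Bool) (out : String) : Decidable (Spec_split_on_upper string capitalize out) := by unfold Spec_split_on_upper; infer_instance

-- ===== CLAIM (what is proved, stated in full; the proofs are below) =====
def Claim_equal_split_on_upper : Prop := ∀ (string : String) (capitalize : Bool), Dom_split_on_upper string capitalize → Pre_split_on_upper string capitalize → Spec_split_on_upper string capitalize (split_on_upper string capitalize)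

-- ===== LEMMAS AND PROOFS =====

-- replace with a single-character pattern acts pointwise
theorem replace_go_single (u : Char) (new : List Char) :
    ∀ (fuel : Nat) (l acc : List Char), l.length ≤ fuel →
      PySem.Chars.replace.go [u] new fuel l acc
        = acc.reverse ++ l.flatMap (fun c => if c = u then new else [c]) := by
  intro fuel
  induction fuel with
  | zero =>
    intro l acc h
    have : l = [] := List.length_eq_zero_iff.mp (Nat.le_zero.mp h)
    subst this
    simp [PySem.Chars.replace.go]
  | succ n ih =>
    intro l acc h
    cases l with
    | nil => simp [PySem.Chars.replace.go]
    | cons c t =>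
      have hlen : t.length ≤ n := by simpa using Nat.lt_succ_iff.mp (by simpa using h)
      by_cases hc : c = u
      · subst hc
        have hpre : List.isPrefixOf [c] (c :: t) = true := by
          simp [List.isPrefixOf]
        simp only [PySem.Chars.replace.go, hpre, if_true]
        rw [show List.drop [c].length (c :: t) = t from rfl]
        rw [ih t (new.reverse ++ acc) hlen]
        simp
      · have hpre : List.isPrefixOf [u] (c :: t) = false := by
          simp [List.isPrefixOf]
          exact fun h' => hc h'.symm
        simp only [PySem.Chars.replace.go, hpre, Bool.false_eq_true, if_false]
        rw [ih t (c :: acc) hlen]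
        simp [hc]

theorem replace_single (s : List Char) (u : Char) (new : List Char) :
    PySem.Chars.replace s [u] new = s.flatMap (fun c => if c = u then new else [c]) := by
  simp only [PySem.Chars.replace, List.isEmpty_cons, Bool.false_eq_true, if_false]
  exact replace_go_single u new s.length s [] (le_refl _)

theorem isupper_lowerChar (u : Char) (h : PySem.Chars.isupper u = true) :
    PySem.Chars.isupper (PySem.Chars.lowerChar u) = false := by
  have hb : 65 ≤ u.toNat ∧ u.toNat ≤ 90 := by
    rw [PySem.Chars.isupper] at h
    simp only [Bool.and_eq_true, decide_eq_true_eq, Char.le_def, UInt32.le_iff_toNat_le] at h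
    exact h
  rw [PySem.Chars.lowerChar, if_pos h]
  have ht : (Char.ofNat (u.toNat + 32)).toNat = u.toNat + 32 := by
    rw [Char.toNat_ofNat]
    have hv : (u.toNat + 32).isValidChar := by left; omega
    simp [hv]
  have hZ : ¬ (Char.ofNat (u.toNat + 32) ≤ 'Z') := by
    rw [Char.le_def, UInt32.le_iff_toNat_le]
    show ¬ (Char.ofNat (u.toNat + 32)).toNat ≤ ('Z' : Char).toNat
    have h90 : ('Z' : Char).toNat = 90 := by decide
    rw [ht, h90]; omega
  rw [PySem.Chars.isupper]
  simp [hZ]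

theorem isupper_space : PySem.Chars.isupper ' ' = false := by decide

-- lowerChar is the identity on non-uppercase characters
theorem lowerChar_of_not_upper (c : Char) (h : PySem.Chars.isupper c = false) :
    PySem.Chars.lowerChar c = c := by
  rw [PySem.Chars.lowerChar, h]; simp

-- folding one full-string replace per uppercase letter equals one pointwise pass
theorem foldl_replace_uppers (us : List Char) :
    ∀ (s : List Char), (∀ u ∈ us, PySem.Chars.isupper u = true) →
      us.foldl (fun acc u => PySem.Chars.replace acc [u] [' ', PySem.Chars.lowerChar u]) s
        = s.flatMap (fun c => if c ∈ us then [' ', PySem.Chars.lowerChar c] else [c]) := by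
  induction us with
  | nil => intro s _; simp
  | cons u rest ih =>
    intro s hall
    have hu : PySem.Chars.isupper u = true := hall u List.mem_cons_self
    have hrest : ∀ v ∈ rest, PySem.Chars.isupper v = true :=
      fun v hv => hall v (List.mem_cons_of_mem _ hv)
    have hsp : ' ' ∉ rest := fun hm => by
      have := hrest ' ' hm; rw [isupper_space] at this; exact Bool.false_ne_true this
    have hlo : PySem.Chars.lowerChar u ∉ rest := fun hm => by
      have := hrest _ hm; rw [isupper_lowerChar u hu] at this; exact Bool.false_ne_true this
    simp only [List.foldl_cons]
    rw [ih _ hrest, replace_single, List.flatMap_assoc]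
    apply List.flatMap_congr
    intro c _
    by_cases hc : c = u
    · subst hc
      simp [hsp, hlo]
    · simp [hc, List.mem_cons]

theorem filter_pass (s : List Char) :
    (s.filter (fun c => PySem.Chars.isupper c)).foldl
        (fun acc u => PySem.Chars.replace acc [u] [' ', PySem.Chars.lowerChar u]) s
      = s.flatMap (fun c => if PySem.Chars.isupper c then [' ', PySem.Chars.lowerChar c] else [c]) := by
  rw [foldl_replace_uppers _ s (fun u hu => (List.mem_filter.mp hu).2)]
  apply List.flatMap_congr
  intro c hcs
  by_cases hc : PySem.Chars.isupper c = true
  · rw [if_pos (List.mem_filter.mpr ⟨hcs, hc⟩), if_pos hc]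
  · rw [if_neg (fun hm => hc (List.mem_filter.mp hm).2), if_neg hc]

-- B's single recursive pass computes the same pointwise expansion
theorem bExpand_eq_flatMap (s : List Char) :
    bExpand s = s.flatMap (fun c => if PySem.Chars.isupper c then [' ', PySem.Chars.lowerChar c] else [c]) := by
  induction s with
  | nil => rfl
  | cons c t ih =>
    by_cases hc : PySem.Chars.isupper c = true
    · simp [bExpand, hc, ih]
    · simp [bExpand, hc, ih]

-- every character emitted by bExpand is non-uppercase
theorem bExpand_no_upper (s : List Char) :
    ∀ e ∈ bExpand s, PySem.Chars.isupper e = false := by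
  induction s with
  | nil => intro e he; simp [bExpand] at he
  | cons c t ih =>
    intro e he
    by_cases hc : PySem.Chars.isupper c = true
    · rw [bExpand, if_pos hc] at he
      simp only [List.mem_cons] at he
      rcases he with h | h | h
      · rw [h]; exact isupper_space
      · rw [h]; exact isupper_lowerChar c hc
      · exact ih e h
    · rw [bExpand, if_neg hc] at he
      simp only [List.mem_cons] at he
      rcases he with h | h
      · rw [h]; exact Bool.eq_false_iff.mpr hc
      · exact ih e h

-- A's capitalize agrees with B's first-char fix on uppercase-free lists
theorem aCapitalize_eq_bCapFirst (s : List Char)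
    (h : ∀ e ∈ s, PySem.Chars.isupper e = false) :
    aCapitalize s = bCapFirst s := by
  cases s with
  | nil => rfl
  | cons c t =>
    simp only [aCapitalize, bCapFirst, List.cons.injEq, true_and]
    calc t.map PySem.Chars.lowerChar
        = t.map id := List.map_congr_left (fun e he =>
            lowerChar_of_not_upper e (h e (List.mem_cons_of_mem _ he)))
      _ = t := List.map_id t

-- ===== VERDICT (by name: the statement is the Claim_ definition above) =====
theorem split_on_upper_spec : Claim_equal_split_on_upper := by
  intro s cap _ _
  unfold Spec_split_on_upper split_on_upper split_on_upper_alt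
  simp only [aSplitExceptions]
  rw [filter_pass, ← bExpand_eq_flatMap]
  congr 1
  exact aCapitalize_eq_bCapFirst _ (bExpand_no_upper _)
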